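-- pv_equiv track=rewrite | github.com/cercai/CodinGame | medium/mars-lander-2.py | get_max_speed
-- ===== SOURCE A (Python) =====
-- def get_max_speed(x):
--     DX = [-1500, -600, -200, 200, 600, 1500]
--     MAX_SPEED = [40, 20, 5, -5, -20, -40]
--
--     for i in range(len(DX) - 1):
--         if DX[i] <= x < DX[i + 1]:
--             return MAX_SPEED[i]
--
--     if x < DX[0]:
--         return MAX_SPEED[0]
--     elif x >= DX[-1]:
--         return MAX_SPEED[-1]
-- ===== SOURCE B (Python) =====
-- def get_max_speed(x):
--     BOUNDS = [-600, -200, 200, 600, 1500]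
--     SPEEDS = [40, 20, 5, -5, -20, -40]
--     return SPEEDS[sum(b <= x for b in BOUNDS)]
-- ===== Notes on version B (the rewrite author's own statement) =====
-- stated objective: simpler
-- what changed: Replaced the linear scan over interval pairs plus two fallback branches with a single table lookup indexed by the count of thresholds x meets (the -1500 boundary merges away since both sides of it return 40).
import Mathlib
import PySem

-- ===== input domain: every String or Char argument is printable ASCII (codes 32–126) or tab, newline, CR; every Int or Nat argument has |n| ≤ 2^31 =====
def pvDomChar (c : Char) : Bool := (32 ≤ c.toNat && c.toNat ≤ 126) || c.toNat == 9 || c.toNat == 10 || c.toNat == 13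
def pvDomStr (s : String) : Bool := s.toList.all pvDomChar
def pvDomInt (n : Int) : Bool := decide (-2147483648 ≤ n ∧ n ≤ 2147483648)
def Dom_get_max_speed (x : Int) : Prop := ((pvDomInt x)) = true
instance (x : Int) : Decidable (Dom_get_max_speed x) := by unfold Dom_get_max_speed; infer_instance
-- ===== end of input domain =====

-- B replaces A's linear interval scan with a lookup indexed by the count of thresholds met (simpler).


-- ===== PORT A =====
-- Port of A: linear scan over adjacent threshold pairs (early return via findSome?),
-- then the two fallback branches (the final implicit None is unreachable for Int x).
def get_max_speed (x : Int) : Int :=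
  let DX : List Int := [-1500, -600, -200, 200, 600, 1500]
  let MAX_SPEED : List Int := [40, 20, 5, -5, -20, -40]
  match (PySem.List.pyRange 0 (DX.length - 1) 1).findSome? (fun i =>
      if DX.getD i.toNat 0 <= x && x < DX.getD (i.toNat + 1) 0 then
        some (MAX_SPEED.getD i.toNat 0)
      else none) with
  | some v => v
  | none =>
    if x < DX.headD 0 then MAX_SPEED.headD 0
    else MAX_SPEED.getLastD 0

-- ===== PORT B =====
-- Port of B: lookup indexed by how many boundaries are <= x.
def get_max_speed_alt (x : Int) : Int :=
  let BOUNDS : List Int := [-600, -200, 200, 600, 1500]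
  let SPEEDS : List Int := [40, 20, 5, -5, -20, -40]
  SPEEDS.getD (BOUNDS.countP (fun b => decide (b <= x))) 0

-- ===== PRECONDITION & SPEC =====
def Spec_get_max_speed (x : Int) (out : Int) : Prop := out = get_max_speed_alt x
instance (x : Int) (out : Int) : Decidable (Spec_get_max_speed x out) := by unfold Spec_get_max_speed; infer_instance

-- ===== CLAIM (what is proved, stated in full; the proofs are below) =====
def Claim_equal_get_max_speed : Prop := ∀ (x : Int), Dom_get_max_speed x → Spec_get_max_speed x (get_max_speed x)

-- ===== LEMMAS AND PROOFS =====

-- shared nested-if characterisation of both ports (proof-only helper)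
def pvSpeedTable (x : Int) : Int :=
  if 1500 ≤ x then -40 else if 600 ≤ x then -20 else if 200 ≤ x then -5
  else if -200 ≤ x then 5 else if -600 ≤ x then 20 else 40

theorem pvAlt_eq_table (x : Int) : get_max_speed_alt x = pvSpeedTable x := by
  unfold get_max_speed_alt pvSpeedTable
  by_cases h1 : -600 ≤ x <;> by_cases h2 : -200 ≤ x <;> by_cases h3 : 200 ≤ x <;>
    by_cases h4 : 600 ≤ x <;> by_cases h5 : 1500 ≤ x <;>
    first
      | omega
      | simp [List.countP, List.countP.go, h1, h2, h3, h4, h5]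

set_option maxHeartbeats 2000000 in
theorem pvA_eq_table (x : Int) : get_max_speed x = pvSpeedTable x := by
  unfold get_max_speed pvSpeedTable
  have hr : PySem.List.pyRange 0 (([-1500, -600, -200, 200, 600, 1500] : List Int).length - 1) 1
      = [0, 1, 2, 3, 4] := by decide
  simp only [hr, List.findSome?, show Int.toNat 2 = 2 from rfl, show Int.toNat 3 = 3 from rfl,
    show Int.toNat 4 = 4 from rfl]
  norm_num
  split_ifs <;> first | rfl | omega

-- ===== VERDICT (by name: the statement is the Claim_ definition above) =====
theorem get_max_speed_spec : Claim_equal_get_max_speed := by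
  intro x _
  unfold Spec_get_max_speed
  rw [pvA_eq_table, pvAlt_eq_table]
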